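-- pv_equiv track=rewrite | github.com/huyu398/AtCoder | AtCoder_Beginners_Selection/ABC085C/Main.py | explore_otoshidama
-- ===== SOURCE A (Python) =====
-- def explore_otoshidama(N, Y):
--     # お札の枚数が一番少なくなる組み合わせ（N を考えない）
--     I = Y // 10
--     J = (Y - 10 * I) // 5
--     K = (Y - 10 * I - 5 * J)
--     # 1000 円が最小単位なので，1000 円札の枚数は K + 5n になるはず
--
--     # I,J,K の合計が N より大きいなら求まる組み合わせはない
--     if I + J + K > N:
--         return -1, -1, -1
--     # I,J,K の合計が N と一致するなら最小枚数が解
--     if I + J + K == N: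
--         return I, J, K
--
--     # 探索する
--     for i in reversed(range(I+1)):
--         # 仮に残りのお札が全部 5000 円とする
--         J = N - i - K
--         for k, j in enumerate(reversed(range(J+1))):
--             # 一致するなら終了
--             if 10 * i + 5 * j + K + k == Y:
--                 return i, j, K + k
--
--     return -1, -1, -1
-- ===== SOURCE B (Python) =====
-- def explore_otoshidama(N, Y):
--     # Closed form: a solution means 9*i + 4*j = Y - N with i, j >= 0 and
--     # j <= N - i - K (K = Y % 5, the forced 1000-yen remainder).  A feasible i must
--     # satisfy i = (Y - N) (mod 4), i <= (Y - N) // 9 (so j >= 0) and i <= Y // 10;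
--     # the j-bound only improves as i grows, so the largest such i decides everything.
--     K = Y % 5
--     r = (Y - N) % 4
--     U = min(Y // 10, (Y - N) // 9)
--     i = U - (U - r) % 4
--     if i >= 0:
--         j = (Y - N - 9 * i) // 4
--         if j <= N - i - K:
--             return i, j, N - i - j
--     return -1, -1, -1
-- ===== Notes on version B (the rewrite author's own statement) =====
-- stated objective: faster
-- what changed: A nests a scan over all 5000-yen counts j inside a scan over all 10000-yen counts i; B solves the linear system (9*i + 4*j = Y - N with the range constraints) in closed form for the largest feasible i, with no loop at all.
-- intended difference: For Y < 0 whose greedy count Y//10 + (Y%10)//5 + Y%5 equals N, A's minimal-count shortcut returns a triple with a negative 10000-yen-bill count (e.g. A(0,-5) = (-1, 1, 0)) while B returns (-1, -1, -1); bill counts cannot be negative, so 'no solution' is the intended answer. — e.g. on explore_otoshidama(0, -5): A returns (-1, 1, 0), B returns (-1, -1, -1)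
import Mathlib
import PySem

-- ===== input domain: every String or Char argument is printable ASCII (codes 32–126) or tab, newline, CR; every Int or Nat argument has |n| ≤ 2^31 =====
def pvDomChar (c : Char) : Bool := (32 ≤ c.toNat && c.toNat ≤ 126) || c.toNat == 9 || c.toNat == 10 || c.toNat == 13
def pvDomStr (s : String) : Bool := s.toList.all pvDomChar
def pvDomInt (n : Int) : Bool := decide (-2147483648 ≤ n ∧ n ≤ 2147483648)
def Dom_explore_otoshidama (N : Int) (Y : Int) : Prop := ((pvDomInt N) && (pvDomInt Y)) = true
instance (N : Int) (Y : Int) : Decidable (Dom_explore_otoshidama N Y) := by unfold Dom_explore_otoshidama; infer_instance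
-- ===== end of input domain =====

-- B replaces A's nested search (all 10000-yen counts i times all 5000-yen counts j) by a
-- closed-form solve of 9*i + 4*j = Y - N for the largest feasible i: O(1) instead of a scan.


-- ===== PORT A =====
-- hand-port of the inner loop 'for k, j in enumerate(reversed(range(J+1)))':
-- n = remaining iterations, k = enumerate counter (from 0), j = current range value (from J, step -1)
def pvInnerA (i K Y : Int) : Nat → Int → Int → Option (Int × Int × Int)
  | 0, _, _ => none
  | n+1, k, j =>
      if 10 * i + 5 * j + K + k = Y then some (i, j, K + k)
      else pvInnerA i K Y n (k+1) (j-1)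

-- hand-port of the outer loop 'for i in reversed(range(I+1))': n = remaining iterations, i = current value
def pvLoopA (N K Y : Int) : Nat → Int → Int × Int × Int
  | 0, _ => (-1, -1, -1)
  | n+1, i =>
      let J := N - i - K
      match pvInnerA i K Y (J + 1).toNat 0 J with
      | some r => r
      | none => pvLoopA N K Y n (i-1)

def explore_otoshidama (N : Int) (Y : Int) : Int × Int × Int :=
  let I := PySem.Int.floordiv Y 10
  let J := PySem.Int.floordiv (Y - 10 * I) 5
  let K := Y - 10 * I - 5 * J
  if I + J + K > N then (-1, -1, -1)
  else if I + J + K = N then (I, J, K)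
  else pvLoopA N K Y (I + 1).toNat I

-- ===== PORT B =====
-- closed form: K = Y%5; r = (Y-N)%4; U = min(Y//10, (Y-N)//9); i = U - (U-r)%4;
-- if i >= 0 and j := (Y-N-9*i)//4 <= N-i-K: return (i, j, N-i-j) else (-1, -1, -1)
def explore_otoshidama_alt (N : Int) (Y : Int) : Int × Int × Int :=
  let K := PySem.Int.mod Y 5
  let r := PySem.Int.mod (Y - N) 4
  let U := min (PySem.Int.floordiv Y 10) (PySem.Int.floordiv (Y - N) 9)
  let i := U - PySem.Int.mod (U - r) 4
  if 0 ≤ i then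
    let j := PySem.Int.floordiv (Y - N - 9 * i) 4
    if j ≤ N - i - K then (i, j, N - i - j) else (-1, -1, -1)
  else (-1, -1, -1)



-- ===== PRECONDITION & SPEC =====
-- For Y < 0 whose greedy bill count Y//10 + (Y%10)//5 + Y%5 happens to equal N, A's
-- minimal-count shortcut returns a triple with a NEGATIVE 10000-yen-bill count (e.g. (-1, 1, 0)),
-- while B returns the intended no-solution answer (-1, -1, -1): bill counts cannot be negative.
def D_explore_otoshidama (N : Int) (Y : Int) : Prop :=
  Y < 0 ∧ Y / 10 + (Y % 10) / 5 + Y % 5 = N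
instance (N : Int) (Y : Int) : Decidable (D_explore_otoshidama N Y) := by
  unfold D_explore_otoshidama; infer_instance

def Spec_explore_otoshidama (N : Int) (Y : Int) (out : Int × Int × Int) : Prop :=
  ¬ D_explore_otoshidama N Y → out = explore_otoshidama_alt N Y
instance (N : Int) (Y : Int) (out : Int × Int × Int) : Decidable (Spec_explore_otoshidama N Y out) := by
  unfold Spec_explore_otoshidama; infer_instance

def pvDiffWitness_explore_otoshidama : Int × Int := (0, -5)
def pvDiffWitnessOut_explore_otoshidama : (Int × Int × Int) × (Int × Int × Int) :=
  ((-1, 1, 0), (-1, -1, -1))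

-- ===== CLAIM (what is proved, stated in full; the proofs are below) =====
def Claim_unchanged_explore_otoshidama : Prop := ∀ (N : Int) (Y : Int), Dom_explore_otoshidama N Y → Spec_explore_otoshidama N Y (explore_otoshidama N Y)
def Claim_changed_explore_otoshidama : Prop := Dom_explore_otoshidama (pvDiffWitness_explore_otoshidama.1) (pvDiffWitness_explore_otoshidama.2) ∧ D_explore_otoshidama (pvDiffWitness_explore_otoshidama.1) (pvDiffWitness_explore_otoshidama.2) ∧ explore_otoshidama (pvDiffWitness_explore_otoshidama.1) (pvDiffWitness_explore_otoshidama.2) = pvDiffWitnessOut_explore_otoshidama.1 ∧ explore_otoshidama_alt (pvDiffWitness_explore_otoshidama.1) (pvDiffWitness_explore_otoshidama.2) = pvDiffWitnessOut_explore_otoshidama.2 ∧ pvDiffWitnessOut_explore_otoshidama.1 ≠ pvDiffWitnessOut_explore_otoshidama.2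
def Claim_exact_explore_otoshidama : Prop := ∀ (N : Int) (Y : Int), Dom_explore_otoshidama N Y → D_explore_otoshidama N Y → explore_otoshidama N Y ≠ explore_otoshidama_alt N Y

-- ===== LEMMAS AND PROOFS =====

-- pvFeas N Y x: x is a 10000-yen count admitting a solution (the hit condition of both programs).
def pvFeas (N Y x : Int) : Prop :=
  (Y - N - 9*x) % 4 = 0 ∧ 0 ≤ (Y - N - 9*x) / 4
    ∧ (Y - N - 9*x) / 4 ≤ N - x - (Y % 5) ∧ 0 ≤ x

lemma pvInnerA_char (i K Y : Int) : ∀ (n : Nat) (k j : Int),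
    pvInnerA i K Y n k j =
      (if 4 ∣ (10*i + 5*j + K + k - Y)
          ∧ 0 ≤ (10*i + 5*j + K + k - Y) / 4
          ∧ (10*i + 5*j + K + k - Y) / 4 < (n : Int)
       then some (i, j - (10*i + 5*j + K + k - Y) / 4, K + k + (10*i + 5*j + K + k - Y) / 4)
       else none) := by
  intro n
  induction n with
  | zero =>
      intro k j
      rw [if_neg (by omega)]
      rfl
  | succ n ih =>
      intro k j
      simp only [pvInnerA]
      by_cases hhead : 10 * i + 5 * j + K + k = Y
      · have he : 10*i + 5*j + K + k - Y = 0 := by omega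
        rw [if_pos hhead, he, if_pos ⟨by omega, by omega, by omega⟩]
        norm_num
      · rw [if_neg hhead, ih (k+1) (j-1)]
        by_cases h2 : 4 ∣ (10*i + 5*(j-1) + K + (k+1) - Y)
            ∧ 0 ≤ (10*i + 5*(j-1) + K + (k+1) - Y) / 4
            ∧ (10*i + 5*(j-1) + K + (k+1) - Y) / 4 < (n : Int)
        · obtain ⟨hd, hl, hu⟩ := h2
          rw [if_pos ⟨hd, hl, hu⟩, if_pos (show (4:Int) ∣ _ ∧ _ ∧ _ from ⟨by omega, by omega, by omega⟩)]
          simp only [Option.some.injEq, Prod.mk.injEq, true_and]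
          exact ⟨by omega, by omega⟩
        · rw [if_neg h2, if_neg ?_]
          rintro ⟨hd, hl, hu⟩
          exact h2 ⟨by omega, by omega, by omega⟩

lemma pvStep_eq (N K Y i : Int) :
    pvInnerA i K Y ((N - i - K) + 1).toNat 0 (N - i - K) =
      (if (Y - N - 9*i) % 4 = 0 ∧ 0 ≤ (Y - N - 9*i) / 4 ∧ (Y - N - 9*i) / 4 ≤ N - i - K
       then some (i, (Y - N - 9*i) / 4, N - i - (Y - N - 9*i) / 4) else none) := by
  rw [pvInnerA_char]
  by_cases h2 : (Y - N - 9*i) % 4 = 0 ∧ 0 ≤ (Y - N - 9*i) / 4 ∧ (Y - N - 9*i) / 4 ≤ N - i - K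
  · obtain ⟨hd, hl, hu⟩ := h2
    rw [if_pos (show (4:Int) ∣ _ ∧ _ ∧ _ from ⟨by omega, by omega, by omega⟩), if_pos ⟨hd, hl, hu⟩]
    simp only [Option.some.injEq, Prod.mk.injEq, true_and]
    exact ⟨by omega, by omega⟩
  · rw [if_neg h2, if_neg ?_]
    rintro ⟨hd, hl, hu⟩
    exact h2 ⟨by omega, by omega, by omega⟩

-- B's closed form, with the e-division operators unfolded.
lemma pvAlt_unfold (N Y : Int) :
    explore_otoshidama_alt N Y =
      (if 0 ≤ min (Y/10) ((Y-N)/9) - (min (Y/10) ((Y-N)/9) - (Y-N) % 4) % 4 then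
        (if (Y - N - 9 * (min (Y/10) ((Y-N)/9) - (min (Y/10) ((Y-N)/9) - (Y-N) % 4) % 4)) / 4
            ≤ N - (min (Y/10) ((Y-N)/9) - (min (Y/10) ((Y-N)/9) - (Y-N) % 4) % 4) - Y % 5 then
          (min (Y/10) ((Y-N)/9) - (min (Y/10) ((Y-N)/9) - (Y-N) % 4) % 4,
           (Y - N - 9 * (min (Y/10) ((Y-N)/9) - (min (Y/10) ((Y-N)/9) - (Y-N) % 4) % 4)) / 4,
           N - (min (Y/10) ((Y-N)/9) - (min (Y/10) ((Y-N)/9) - (Y-N) % 4) % 4)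
             - (Y - N - 9 * (min (Y/10) ((Y-N)/9) - (min (Y/10) ((Y-N)/9) - (Y-N) % 4) % 4)) / 4)
        else (-1, -1, -1))
      else (-1, -1, -1)) := by
  simp only [explore_otoshidama_alt,
    PySem.Int.mod_eq_emod_of_pos (by norm_num : (0:Int) < 5),
    PySem.Int.mod_eq_emod_of_pos (by norm_num : (0:Int) < 4),
    PySem.Int.floordiv_eq_ediv_of_pos (by norm_num : (0:Int) < 10),
    PySem.Int.floordiv_eq_ediv_of_pos (by norm_num : (0:Int) < 9),
    PySem.Int.floordiv_eq_ediv_of_pos (by norm_num : (0:Int) < 4)]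

-- If no i with 0 ≤ i ≤ Y/10 is feasible, B returns (-1, -1, -1).
lemma pvAlt_none (N Y : Int) (h : ∀ x : Int, 0 ≤ x → x ≤ Y / 10 → ¬ pvFeas N Y x) :
    explore_otoshidama_alt N Y = (-1, -1, -1) := by
  rw [pvAlt_unfold]
  set U := min (Y/10) ((Y-N)/9) with hU
  set i := U - (U - (Y-N) % 4) % 4 with hi
  have hiU : i ≤ U ∧ U ≤ Y/10 ∧ U ≤ (Y-N)/9 ∧ (4:Int) ∣ (Y - N - 9*i) := by
    constructor; · omega
    refine ⟨by omega, by omega, by omega⟩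
  by_cases h0 : 0 ≤ i
  · rw [if_pos h0]
    by_cases hj : (Y - N - 9*i) / 4 ≤ N - i - Y % 5
    · exfalso
      exact h i h0 (by omega) ⟨by omega, by omega, hj, h0⟩
    · rw [if_neg hj]
  · rw [if_neg h0]

-- A's descending scan from i0 (with fuel i0+1, i.e. down to 0) returns exactly B's
-- closed form, provided nothing above i0 (up to Y/10) is feasible.
lemma pvScan (N Y : Int) : ∀ (n : Nat) (i0 : Int),
    (n : Int) = i0 + 1 → i0 ≤ Y / 10 →
    (∀ x : Int, i0 < x → x ≤ Y / 10 → ¬ pvFeas N Y x) →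
    pvLoopA N (Y % 5) Y n i0 = explore_otoshidama_alt N Y := by
  intro n
  induction n with
  | zero =>
      intro i0 hfuel hU hinv
      symm
      apply pvAlt_none
      intro x hx0 hxU
      exact hinv x (by omega) hxU
  | succ n ih =>
      intro i0 hfuel hU hinv
      show (match pvInnerA i0 (Y % 5) Y ((N - i0 - Y % 5) + 1).toNat 0 (N - i0 - Y % 5) with
            | some r => r
            | none => pvLoopA N (Y % 5) Y n (i0-1)) = _
      rw [pvStep_eq]
      by_cases hc : (Y - N - 9*i0) % 4 = 0 ∧ 0 ≤ (Y - N - 9*i0) / 4 ∧ (Y - N - 9*i0) / 4 ≤ N - i0 - Y % 5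
      · rw [if_pos hc]
        obtain ⟨hd, hl, hj⟩ := hc
        have hi00 : 0 ≤ i0 := by omega
        rw [pvAlt_unfold]
        set U := min (Y/10) ((Y-N)/9) with hUdef
        set istar := U - (U - (Y-N) % 4) % 4 with histar
        have hi0U : i0 ≤ U := by omega
        have hle : i0 ≤ istar := by omega
        have hsU : istar ≤ U := by omega
        have hsd : (Y - N - 9*istar) % 4 = 0 := by omega
        by_cases heq : istar = i0
        · rw [if_pos (by omega)]
          rw [if_pos (by rw [heq]; exact hj)]
          rw [heq]
        · exfalso
          apply hinv istar (by omega) (by omega)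
          refine ⟨hsd, by omega, by omega, by omega⟩
      · rw [if_neg hc]
        apply ih (i0 - 1) (by omega) (by omega)
        intro x hx hxU
        by_cases hxi : x = i0
        · subst hxi
          rintro ⟨h1, h2, h3, _⟩
          exact hc ⟨h1, h2, h3⟩
        · exact hinv x (by omega) hxU

lemma pvMain_eq (N Y : Int) (hnd : ¬ D_explore_otoshidama N Y) :
    explore_otoshidama N Y = explore_otoshidama_alt N Y := by
  have h10 : PySem.Int.floordiv Y 10 = Y / 10 :=
    PySem.Int.floordiv_eq_ediv_of_pos (by norm_num)
  have hin : Y - 10 * (Y / 10) = Y % 10 := by omega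
  have h5 : PySem.Int.floordiv (Y % 10) 5 = (Y % 10) / 5 :=
    PySem.Int.floordiv_eq_ediv_of_pos (by norm_num)
  have hK : Y % 10 - 5 * (Y % 10 / 5) = Y % 5 := by omega
  simp only [explore_otoshidama, h10, hin, h5, hK]
  by_cases hY : 0 ≤ Y
  · by_cases hgt : Y / 10 + (Y % 10) / 5 + Y % 5 > N
    · rw [if_pos hgt]
      symm
      apply pvAlt_none
      intro x hx0 hxU
      rintro ⟨hd, hl, hu, _⟩
      omega
    · rw [if_neg hgt]
      by_cases heq : Y / 10 + (Y % 10) / 5 + Y % 5 = N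
      · rw [if_pos heq, pvAlt_unfold]
        set U := min (Y/10) ((Y-N)/9) with hUdef
        set istar := U - (U - (Y-N) % 4) % 4 with histar
        have hUI : U = Y / 10 := by omega
        have hs : istar = Y / 10 := by omega
        rw [if_pos (by omega), if_pos (by omega)]
        simp only [Prod.mk.injEq]
        refine ⟨by omega, by omega, by omega⟩
      · rw [if_neg heq]
        exact pvScan N Y (Y/10 + 1).toNat (Y/10) (by omega) (le_refl _)
          (fun x hx hxU => absurd hxU (by omega))
  · have hne : Y / 10 + (Y % 10) / 5 + Y % 5 ≠ N := by
      intro h; exact hnd ⟨by omega, h⟩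
    have hz : (Y / 10 + 1).toNat = 0 := by omega
    have halt : explore_otoshidama_alt N Y = (-1, -1, -1) :=
      pvAlt_none N Y (fun x hx0 hxU => absurd (le_trans hx0 hxU) (by omega))
    rw [halt, hz]
    by_cases hgt : Y / 10 + (Y % 10) / 5 + Y % 5 > N
    · rw [if_pos hgt]
    · rw [if_neg hgt, if_neg hne]
      rfl

lemma pvTight (N Y : Int) (hd : D_explore_otoshidama N Y) :
    explore_otoshidama N Y ≠ explore_otoshidama_alt N Y := by
  obtain ⟨hY, hsum⟩ := hd
  have h10 : PySem.Int.floordiv Y 10 = Y / 10 :=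
    PySem.Int.floordiv_eq_ediv_of_pos (by norm_num)
  have hin : Y - 10 * (Y / 10) = Y % 10 := by omega
  have h5 : PySem.Int.floordiv (Y % 10) 5 = (Y % 10) / 5 :=
    PySem.Int.floordiv_eq_ediv_of_pos (by norm_num)
  have hK : Y % 10 - 5 * (Y % 10 / 5) = Y % 5 := by omega
  have halt : explore_otoshidama_alt N Y = (-1, -1, -1) :=
    pvAlt_none N Y (fun x hx0 hxU => absurd (le_trans hx0 hxU) (by omega))
  simp only [explore_otoshidama, h10, hin, h5, hK, halt]
  rw [if_neg (by omega), if_pos hsum]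
  simp only [ne_eq, Prod.mk.injEq, not_and]
  intro _ h
  omega

-- ===== VERDICT (by name: the statement is the Claim_ definition above) =====
theorem explore_otoshidama_spec : Claim_unchanged_explore_otoshidama := by
  intro N Y _ hnd
  exact pvMain_eq N Y hnd

theorem explore_otoshidama_changed : Claim_changed_explore_otoshidama := by
  unfold Claim_changed_explore_otoshidama; decide

theorem explore_otoshidama_tight : Claim_exact_explore_otoshidama := by
  intro N Y _ hd
  exact pvTight N Y hd
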